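-- pv_equiv track=rewrite | github.com/NathanThai2201/Logospeech | Logospeech.py | f
-- ===== SOURCE A (Python) =====
-- def f(t_input):
--     fib = [0,1]
--     i=2
--     while fib[i-1]<len(t_input):
--         fib.append(fib[i-1]+ fib[i-2])
--         index1 = fib[i]
--         i+=1
--         fib.append(fib[i-1]+ fib[i-2])
--         index2 = fib[i]
--         i+=1
--         if index1 < len(t_input) and index2 < len(t_input):
--             temp =t_input[index1]
--             t_input[index1] = t_input[index2]
--             t_input[index2] = temp
--     return t_input
-- ===== SOURCE B (Python) =====
-- def f(t_input):
--     # Build a permutation dict pairing consecutive Fibonacci indices (1,2),(3,5),(8,13),...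
--     # that both fit in the list, then rebuild the list in one pass through that map.
--     n = len(t_input)
--     perm = {}
--     a, b = 1, 2
--     while b < n:
--         perm[a], perm[b] = b, a
--         a, b = a + b, a + 2 * b
--     t_input[:] = [t_input[perm.get(i, i)] for i in range(n)]
--     return t_input
-- ===== Notes on version B (the rewrite author's own statement) =====
-- stated objective: alternative
-- what changed: B builds a permutation dictionary pairing consecutive Fibonacci indices and rebuilds the whole list in one comprehension through that map, instead of A's interleaved loop that grows a fib table and performs in-place temp swaps.
import Mathlib
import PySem

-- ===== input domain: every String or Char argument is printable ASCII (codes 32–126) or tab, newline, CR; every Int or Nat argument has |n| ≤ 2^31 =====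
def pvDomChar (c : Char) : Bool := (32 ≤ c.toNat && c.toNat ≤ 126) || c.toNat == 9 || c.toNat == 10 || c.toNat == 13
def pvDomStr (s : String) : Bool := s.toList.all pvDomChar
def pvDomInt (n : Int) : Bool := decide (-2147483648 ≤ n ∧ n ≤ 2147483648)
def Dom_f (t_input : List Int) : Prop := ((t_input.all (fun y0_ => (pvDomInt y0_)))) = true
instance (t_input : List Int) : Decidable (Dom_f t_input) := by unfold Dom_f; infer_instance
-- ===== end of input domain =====

-- B builds a permutation dictionary pairing consecutive Fibonacci indices and rebuilds the
-- whole list in one pass through that map; A interleaves fib generation and in-place swaps.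
-- Both Pythons mutate t_input in place and return it; the proof is about the return value.

-- ===== PORT A =====
-- the three-assignment temp swap of Python, indices in range
def swap2 (t : List Int) (i j : Nat) : List Int :=
  (t.set i (t.getD j 0)).set j (t.getD i 0)

-- A's fib list is only ever read at its last two positions fib[i-2], fib[i-1]; the loop
-- carries exactly those two values (a, b); index1 = a + b, index2 = index1 + b; a < b is
-- the invariant needed for termination (index2 > b, so b strictly increases).
def loopA (n : Nat) (t : List Int) (a b : Nat) (h : a < b) : List Int :=
  if hb : b < n then
    loopA n
      (if a + b < n ∧ (a + b) + b < n then swap2 t (a + b) ((a + b) + b) else t)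
      (a + b) ((a + b) + b) (by omega)
  else t
termination_by n - b
decreasing_by omega

def f (t_input : List Int) : List Int :=
  loopA t_input.length t_input 0 1 (by omega)

-- ===== PORT B =====
-- the while loop: perm[a], perm[b] = b, a ; a, b = a+b, a+2*b  (invariant 0 < a < b)
def buildPerm (n a b : Nat) (h : 0 < a ∧ a < b) (d : PySem.Dict Nat Nat) : PySem.Dict Nat Nat :=
  if hb : b < n then
    buildPerm n (a + b) (a + 2 * b) (by omega) ((d.insert a b).insert b a)
  else d
termination_by n - b
decreasing_by omega

-- t_input[:] = [t_input[perm.get(i, i)] for i in range(n)]; return t_input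
def f_alt (t_input : List Int) : List Int :=
  let d := buildPerm t_input.length 1 2 (by omega) PySem.Dict.empty
  (List.range t_input.length).map
    (fun i => (PySem.List.pyGet? t_input ((d.getD i i : Nat) : Int)).getD 0)

-- ===== PRECONDITION & SPEC =====
def Spec_f (t_input : List Int) (out : List Int) : Prop := out = f_alt t_input
instance (t_input : List Int) (out : List Int) : Decidable (Spec_f t_input out) := by unfold Spec_f; infer_instance

-- ===== CLAIM =====
def Claim_equal_f : Prop := ∀ (t_input : List Int), Dom_f t_input → Spec_f t_input (f t_input)

-- ===== LEMMAS AND PROOFS =====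

-- the permutation both programs apply, as a pure function on an index
def partner (n a b i : Nat) (h : 0 < a ∧ a < b) : Nat :=
  if hb : b < n then
    if i = a then b else if i = b then a else partner n (a + b) (a + 2 * b) i (by omega)
  else i
termination_by n - b
decreasing_by omega

lemma partner_congr (n a a' b b' i : Nat) (h : 0 < a ∧ a < b) (h' : 0 < a' ∧ a' < b')
    (e1 : a = a') (e2 : b = b') : partner n a b i h = partner n a' b' i h' := by
  subst e1; subst e2; rfl

lemma partner_stop (n a b i : Nat) (h : 0 < a ∧ a < b) (hb : ¬ b < n) :
    partner n a b i h = i := by rw [partner]; simp [hb]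

lemma partner_small (n : Nat) :
    ∀ (k a b : Nat) (h : 0 < a ∧ a < b) (i : Nat), n - b ≤ k → i < a →
      partner n a b i h = i := by
  intro k
  induction k with
  | zero =>
    intro a b h i hk hi
    exact partner_stop n a b i h (by omega)
  | succ k ih =>
    intro a b h i hk hi
    rw [partner]
    by_cases hb : b < n
    · have h1 : i ≠ a := by omega
      have h2 : i ≠ b := by omega
      simp only [hb, dif_pos, h1, h2, if_false]
      exact ih (a + b) (a + 2 * b) (by omega) i (by omega) (by omega)
    · simp [hb]

lemma partner_big (n : Nat) :
    ∀ (k a b : Nat) (h : 0 < a ∧ a < b) (i : Nat), n - b ≤ k → n ≤ i →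
      partner n a b i h = i := by
  intro k
  induction k with
  | zero =>
    intro a b h i hk hi
    exact partner_stop n a b i h (by omega)
  | succ k ih =>
    intro a b h i hk hi
    rw [partner]
    by_cases hb : b < n
    · have h1 : i ≠ a := by omega
      have h2 : i ≠ b := by omega
      simp only [hb, dif_pos, h1, h2, if_false]
      exact ih (a + b) (a + 2 * b) (by omega) i (by omega) hi
    · simp [hb]

lemma partner_ge (n : Nat) :
    ∀ (k a b : Nat) (h : 0 < a ∧ a < b) (i : Nat), n - b ≤ k →
      partner n a b i h = i ∨ a ≤ partner n a b i h := by
  intro k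
  induction k with
  | zero =>
    intro a b h i hk
    rw [partner_stop n a b i h (by omega)]; left; rfl
  | succ k ih =>
    intro a b h i hk
    rw [partner]
    by_cases hb : b < n
    · simp only [hb, dif_pos]
      by_cases h1 : i = a
      · rw [if_pos h1]; right; omega
      · rw [if_neg h1]
        by_cases h2 : i = b
        · rw [if_pos h2]; right; omega
        · rw [if_neg h2]
          rcases ih (a + b) (a + 2 * b) (by omega) i (by omega) with h' | h'
          · left; exact h'
          · right; omega
    · simp [hb]

lemma partner_lt (n : Nat) :
    ∀ (k a b : Nat) (h : 0 < a ∧ a < b) (i : Nat), n - b ≤ k → i < n →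
      partner n a b i h < n := by
  intro k
  induction k with
  | zero =>
    intro a b h i hk hi
    rw [partner_stop n a b i h (by omega)]; exact hi
  | succ k ih =>
    intro a b h i hk hi
    rw [partner]
    by_cases hb : b < n
    · simp only [hb, dif_pos]
      by_cases h1 : i = a
      · rw [if_pos h1]; omega
      · rw [if_neg h1]
        by_cases h2 : i = b
        · rw [if_pos h2]; omega
        · rw [if_neg h2]
          exact ih (a + b) (a + 2 * b) (by omega) i (by omega) hi
    · rw [dif_neg hb]; exact hi

lemma buildPerm_keep (n : Nat) :
    ∀ (k a b : Nat) (h : 0 < a ∧ a < b) (d : PySem.Dict Nat Nat) (i x : Nat),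
      n - b ≤ k → i < a → (buildPerm n a b h d).getD i x = d.getD i x := by
  intro k
  induction k with
  | zero =>
    intro a b h d i x hk hi
    rw [buildPerm]; simp [show ¬ b < n by omega]
  | succ k ih =>
    intro a b h d i x hk hi
    rw [buildPerm]
    by_cases hb : b < n
    · simp only [hb, dif_pos]
      rw [ih (a + b) (a + 2 * b) (by omega) _ i x (by omega) (by omega)]
      rw [PySem.Dict.getD_insert, PySem.Dict.getD_insert]
      simp [show ¬ i = b by omega, show ¬ i = a by omega]
    · simp [hb]

lemma buildPerm_getD (n : Nat) :
    ∀ (k a b : Nat) (h : 0 < a ∧ a < b) (d : PySem.Dict Nat Nat) (i : Nat),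
      n - b ≤ k → d.getD i i = i →
      (buildPerm n a b h d).getD i i = partner n a b i h := by
  intro k
  induction k with
  | zero =>
    intro a b h d i hk hd
    rw [buildPerm, partner_stop n a b i h (by omega)]
    simp [show ¬ b < n by omega, hd]
  | succ k ih =>
    intro a b h d i hk hd
    rw [buildPerm, partner]
    by_cases hb : b < n
    · simp only [hb, dif_pos]
      by_cases h1 : i = a
      · rw [if_pos h1,
          buildPerm_keep n k (a + b) (a + 2 * b) (by omega) _ i i (by omega) (by omega)]
        rw [PySem.Dict.getD_insert, PySem.Dict.getD_insert]
        simp [h1]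
      · rw [if_neg h1]
        by_cases h2 : i = b
        · rw [if_pos h2,
            buildPerm_keep n k (a + b) (a + 2 * b) (by omega) _ i i (by omega) (by omega)]
          rw [PySem.Dict.getD_insert]
          simp [h2]
        · rw [if_neg h2]
          refine ih (a + b) (a + 2 * b) (by omega) _ i (by omega) ?_
          rw [PySem.Dict.getD_insert, PySem.Dict.getD_insert]
          simp [h1, h2, hd]
    · simp [hb, hd]

-- A-side: loopA with state (a,b) realises the permutation 'partner' with pair (a+b, a+2b)
lemma swap2_length (t : List Int) (i j : Nat) : (swap2 t i j).length = t.length := by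
  simp [swap2]

lemma swap2_get_left (t : List Int) (i j : Nat) (hij : i ≠ j) (hi : i < t.length)
    (hj : j < t.length) : (swap2 t i j)[i]? = t[j]? := by
  unfold swap2
  rw [List.getElem?_set_ne (by omega), List.getElem?_set_self (by simpa using hi),
    List.getD_eq_getElem t 0 hj, List.getElem?_eq_getElem hj]

lemma swap2_get_right (t : List Int) (i j : Nat) (hi : i < t.length) (hj : j < t.length) :
    (swap2 t i j)[j]? = t[i]? := by
  unfold swap2
  rw [List.getElem?_set_self (by simpa using hj), List.getD_eq_getElem t 0 hi,
    List.getElem?_eq_getElem hi]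

lemma swap2_get_other (t : List Int) (i j m : Nat) (h1 : m ≠ i) (h2 : m ≠ j) :
    (swap2 t i j)[m]? = t[m]? := by
  unfold swap2
  rw [List.getElem?_set_ne (by omega), List.getElem?_set_ne (by omega)]

lemma loopA_get (n : Nat) :
    ∀ (k : Nat) (t : List Int) (a b : Nat) (h : a < b), t.length = n → n - b ≤ k → ∀ i,
      (loopA n t a b h)[i]? = t[(partner n (a + b) (a + 2 * b) i (by omega))]? := by
  intro k
  induction k with
  | zero =>
    intro t a b h ht hk i
    rw [loopA, partner_stop n _ _ i _ (by omega)]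
    simp [show ¬ b < n by omega]
  | succ k ih =>
    intro t a b h ht hk i
    rw [loopA]
    by_cases hb : b < n
    · simp only [hb, dif_pos]
      set t' := if a + b < n ∧ (a + b) + b < n then swap2 t (a + b) ((a + b) + b) else t with ht'
      have hlen : t'.length = n := by
        rw [ht']; split
        · rw [swap2_length]; exact ht
        · exact ht
      rw [ih t' (a + b) ((a + b) + b) (by omega) hlen (by omega) i]
      conv_rhs => rw [partner]
      by_cases hb2 : a + 2 * b < n
      · simp only [hb2, dif_pos]
        rw [ht', if_pos (by omega : a + b < n ∧ (a + b) + b < n)]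
        by_cases h1 : i = a + b
        · subst h1
          rw [if_pos rfl]
          rw [partner_small n (n + k) ((a + b) + ((a + b) + b)) ((a + b) + 2 * ((a + b) + b))
            (by omega) _ (by omega) (by omega)]
          rw [swap2_get_left t (a + b) ((a + b) + b) (by omega) (by omega) (by omega)]
          congr 1
          omega
        · rw [if_neg h1]
          by_cases h2 : i = a + 2 * b
          · subst h2
            rw [if_pos rfl]
            rw [partner_small n (n + k) ((a + b) + ((a + b) + b)) ((a + b) + 2 * ((a + b) + b))
              (by omega) _ (by omega) (by omega)]
            have : (a + 2 * b) = (a + b) + b := by omega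
            rw [this, swap2_get_right t (a + b) ((a + b) + b) (by omega) (by omega)]
          · rw [if_neg h2]
            rw [partner_congr n ((a + b) + ((a + b) + b)) ((a + b) + (a + 2 * b))
              ((a + b) + 2 * ((a + b) + b)) ((a + b) + 2 * (a + 2 * b)) i
              (by omega) (by omega) (by omega) (by omega)]
            rcases partner_ge n (n + k) ((a + b) + (a + 2 * b)) ((a + b) + 2 * (a + 2 * b))
              (by omega) i (by omega) with h' | h'
            · rw [h']
              exact swap2_get_other t (a + b) ((a + b) + b) i (by omega) (by omega)
            · exact swap2_get_other t (a + b) ((a + b) + b) _ (by omega) (by omega)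
      · rw [dif_neg hb2, ht', if_neg (by omega)]
        rw [partner_stop n _ _ i _ (by omega)]
    · rw [dif_neg hb, partner_stop n _ _ i _ (by omega)]

lemma f_get (t : List Int) (i : Nat) :
    (f t)[i]? = t[(partner t.length 1 2 i (by omega))]? := by
  have := loopA_get t.length (t.length + 1) t 0 1 (by omega) rfl (by omega) i
  unfold f
  rw [this]

-- ===== VERDICT =====
theorem f_spec : Claim_equal_f := by
  intro t _
  unfold Spec_f f_alt
  apply List.ext_getElem?
  intro i
  rw [f_get]
  by_cases hi : i < t.length
  · rw [List.getElem?_map, List.getElem?_range hi]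
    simp only [Option.map_some]
    rw [buildPerm_getD t.length (t.length + 1) 1 2 (by omega) PySem.Dict.empty i (by omega)
      (by simp [PySem.Dict.getD_empty])]
    have hp : partner t.length 1 2 i (by omega) < t.length :=
      partner_lt t.length (t.length + 1) 1 2 (by omega) i (by omega) hi
    rw [PySem.List.pyGet?_natCast, List.getElem?_eq_getElem hp]
    simp
  · rw [partner_big t.length (t.length + 1) 1 2 (by omega) i (by omega) (by omega)]
    rw [List.getElem?_eq_none (by omega), List.getElem?_eq_none (by simp; omega)]
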